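-- pv_equiv track=rewrite | github.com/DigitalGlobe/pyveda | pyveda/main.py | _map_contains_submap
-- ===== SOURCE A (Python) =====
-- def _map_contains_submap(mmap, submap, hard_match=True):
--     """ Checks if a submap is contained in a master map.
--     Map values must define __eq__.
--
--     Args:
--         mmap(dict): master dictionary to check
--         submap(dict): dictionary to look for
--         hard_match(bool): if true, all submap keys must be present in the master map
--
--     Returns:
--         bool: True if submap keys map to values equal to master mapping
--     """
--     mset, sset = set(mmap.keys()), set(submap.keys())
--     if hard_match and not mset.issuperset(sset):
--         return False
--     shared = mset.intersection(sset)
--     if not shared: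
--         return True
--     return all([mmap[key] == submap[key] for key in shared])
-- ===== SOURCE B (Python) =====
-- def _map_contains_submap(mmap, submap, hard_match=True):
--     for key, val in submap.items():
--         if key in mmap:
--             if not (mmap[key] == val):
--                 return False
--         elif hard_match:
--             return False
--     return True
-- ===== Notes on version B (the rewrite author's own statement) =====
-- stated objective: simpler
-- what changed: B is a single early-exit pass over submap.items() using mmap only as a membership/lookup table, replacing A's construction of two key sets, the superset test, the intersection set and the list-comprehension all().
import Mathlib
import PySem

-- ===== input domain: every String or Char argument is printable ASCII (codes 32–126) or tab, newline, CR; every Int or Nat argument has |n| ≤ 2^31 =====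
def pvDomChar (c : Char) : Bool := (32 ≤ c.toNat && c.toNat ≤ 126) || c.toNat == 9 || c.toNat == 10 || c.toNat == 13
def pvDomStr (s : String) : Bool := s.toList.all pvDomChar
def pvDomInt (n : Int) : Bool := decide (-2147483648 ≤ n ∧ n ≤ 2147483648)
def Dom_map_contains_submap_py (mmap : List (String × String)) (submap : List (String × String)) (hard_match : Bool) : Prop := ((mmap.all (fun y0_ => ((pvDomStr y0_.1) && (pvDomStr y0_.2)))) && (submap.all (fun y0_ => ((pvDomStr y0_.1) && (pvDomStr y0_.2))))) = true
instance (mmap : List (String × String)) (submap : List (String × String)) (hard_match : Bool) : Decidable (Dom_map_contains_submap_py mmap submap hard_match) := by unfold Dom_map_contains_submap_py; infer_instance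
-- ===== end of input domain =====

-- B replaces A's two key sets, superset test and intersection by one early-exit pass
-- over submap's items with mmap used only as a lookup table (objective: simpler).


-- ===== PORT A =====
-- the dict arguments arrive as item lists; PySem.Dict.ofList rebuilds the Python dict
def map_contains_submap_py (mmap : List (String × String)) (submap : List (String × String)) (hard_match : Bool) : Bool :=
  let dm := PySem.Dict.ofList mmap
  let ds := PySem.Dict.ofList submap
  let mset := PySem.Set.ofList dm.keys
  let sset := PySem.Set.ofList ds.keys
  if hard_match && !(PySem.Set.issuperset mset sset) then false
  else
    let shared := PySem.Set.inter mset sset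
    if shared.isEmpty then true
    else shared.all (fun key => dm.getD key "" == ds.getD key "")

-- ===== PORT B =====
-- the for-loop with early returns over submap.items()
def pvLoopB (dm : PySem.Dict String String) (hard_match : Bool) : List (String × String) → Bool
  | [] => true
  | (key, val) :: rest =>
    if dm.contains key then
      if !(dm.getD key "" == val) then false
      else pvLoopB dm hard_match rest
    else if hard_match then false
    else pvLoopB dm hard_match rest

def map_contains_submap_py_alt (mmap : List (String × String)) (submap : List (String × String)) (hard_match : Bool) : Bool :=
  pvLoopB (PySem.Dict.ofList mmap) hard_match (PySem.Dict.ofList submap).items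

-- ===== PRECONDITION & SPEC =====
def Spec_map_contains_submap_py (mmap : List (String × String)) (submap : List (String × String)) (hard_match : Bool) (out : Bool) : Prop := out = map_contains_submap_py_alt mmap submap hard_match
instance (mmap : List (String × String)) (submap : List (String × String)) (hard_match : Bool) (out : Bool) : Decidable (Spec_map_contains_submap_py mmap submap hard_match out) := by unfold Spec_map_contains_submap_py; infer_instance

-- ===== CLAIM (what is proved, stated in full; the proofs are below) =====
def Claim_equal_map_contains_submap_py : Prop := ∀ (mmap : List (String × String)) (submap : List (String × String)) (hard_match : Bool), Dom_map_contains_submap_py mmap submap hard_match → Spec_map_contains_submap_py mmap submap hard_match (map_contains_submap_py mmap submap hard_match)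

-- ===== LEMMAS AND PROOFS =====

-- B's loop is an all over the items
theorem pvLoopB_eq_all (dm : PySem.Dict String String) (hard_match : Bool) (l : List (String × String)) :
    pvLoopB dm hard_match l
      = l.all (fun p => if dm.contains p.1 then dm.getD p.1 "" == p.2 else !hard_match) := by
  induction l with
  | nil => rfl
  | cons p rest ih =>
    obtain ⟨k, v⟩ := p
    simp only [pvLoopB, List.all_cons, ih]
    by_cases hc : dm.contains k = true
    · simp only [if_pos hc]
      cases h : (dm.getD k "" == v)
      · simp
      · simp
    · simp only [if_neg hc]
      cases hard_match <;> simp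

-- in a list with distinct keys, find? on a member's key returns that member
theorem find?_of_mem_nodup {p : String × String} {l : List (String × String)}
    (hnd : (l.map Prod.fst).Nodup) (hp : p ∈ l) :
    l.find? (fun q => q.1 == p.1) = some p := by
  induction l with
  | nil => simp at hp
  | cons q rest ih =>
    simp only [List.map_cons, List.nodup_cons] at hnd
    rcases List.mem_cons.mp hp with h | h
    · subst h; simp
    · have hne : (q.1 == p.1) = false := by
        rw [beq_eq_false_iff_ne]
        intro he
        exact hnd.1 (he ▸ List.mem_map_of_mem h)
      simp only [List.find?_cons, hne]
      exact ih hnd.2 h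

-- keys of a dict built by ofList are distinct
theorem nodup_keys_ofList (l : List (String × String)) :
    (PySem.Dict.ofList l).keys.Nodup := by
  have := PySem.Dict.nodup_keys_foldl_insert_key l Prod.fst
      (fun d p => p.2) PySem.Dict.empty (by simp [PySem.Dict.keys, PySem.Dict.empty])
  simpa [PySem.Dict.ofList, PySem.Dict.update] using this

theorem contains_iff_mem_keys (d : PySem.Dict String String) (k : String) :
    d.contains k = true ↔ k ∈ d.keys := by
  constructor
  · intro hc
    rcases List.any_eq_true.mp hc with ⟨q, hq, he⟩
    exact List.mem_map.mpr ⟨q, hq, beq_iff_eq.mp he⟩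
  · intro hk
    rcases List.mem_map.mp hk with ⟨q, hq, he⟩
    exact List.any_eq_true.mpr ⟨q, hq, beq_iff_eq.mpr he⟩

-- superset test = "every submap key is in mmap", read off the items
theorem sup_eq_all (dm ds : PySem.Dict String String) :
    PySem.Set.issuperset (PySem.Set.ofList dm.keys) (PySem.Set.ofList ds.keys)
      = ds.items.all (fun p => dm.contains p.1) := by
  rw [Bool.eq_iff_iff]
  simp only [PySem.Set.issuperset, PySem.Set.issubset, PySem.Set.contains, List.all_eq_true,
    List.contains_iff_mem, PySem.Set.mem_ofList, contains_iff_mem_keys]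
  constructor
  · intro h p hp
    exact h p.1 (List.mem_map.mpr ⟨p, hp, rfl⟩)
  · intro h k hk
    obtain ⟨p, hp, hpk⟩ := List.mem_map.mp hk
    exact hpk ▸ h p hp

-- the intersection comparison = per-item comparison (keys of ds are distinct)
theorem core_eq_all (dm ds : PySem.Dict String String) (hnd : (ds.items.map Prod.fst).Nodup) :
    (PySem.Set.inter (PySem.Set.ofList dm.keys) (PySem.Set.ofList ds.keys)).all
        (fun key => dm.getD key "" == ds.getD key "")
      = ds.items.all (fun p => if dm.contains p.1 then dm.getD p.1 "" == p.2 else true) := by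
  have hval : ∀ p ∈ ds.items, ds.getD p.1 "" = p.2 := by
    intro p hp
    simp [PySem.Dict.getD, PySem.Dict.get?, find?_of_mem_nodup hnd hp]
  rw [Bool.eq_iff_iff]
  simp only [PySem.Set.inter, List.all_eq_true, List.mem_filter, PySem.Set.contains,
    List.contains_iff_mem, PySem.Set.mem_ofList]
  constructor
  · intro h p hp
    by_cases hc : dm.contains p.1 = true
    · rw [if_pos hc, beq_iff_eq]
      have h1 : p.1 ∈ dm.keys := (contains_iff_mem_keys dm p.1).mp hc
      have h2 : p.1 ∈ ds.keys := List.mem_map.mpr ⟨p, hp, rfl⟩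
      have := h p.1 ⟨h1, h2⟩
      rw [beq_iff_eq, hval p hp] at this
      exact this
    · rw [if_neg hc]
  · intro h k hk
    obtain ⟨hk1, hk2⟩ := hk
    obtain ⟨p, hp, hpk⟩ := List.mem_map.mp hk2
    have hc : dm.contains k = true := (contains_iff_mem_keys dm k).mpr hk1
    subst hpk
    have := h p hp
    rw [if_pos hc, beq_iff_eq] at this
    rw [beq_iff_eq, hval p hp, this]

theorem map_contains_submap_py_eq (mmap submap : List (String × String)) (hard_match : Bool) :
    map_contains_submap_py mmap submap hard_match = map_contains_submap_py_alt mmap submap hard_match := by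
  have hnd : ((PySem.Dict.ofList submap).items.map Prod.fst).Nodup := by
    have := nodup_keys_ofList submap
    simpa [PySem.Dict.keys] using this
  have hite : ∀ (l : List String) (P : String → Bool),
      (if l.isEmpty then true else l.all P) = l.all P := by
    intro l P; cases l <;> simp
  simp only [map_contains_submap_py, map_contains_submap_py_alt, pvLoopB_eq_all]
  rw [hite, core_eq_all _ _ hnd, sup_eq_all]
  cases hard_match
  · simp
  · simp only [Bool.true_and, Bool.not_true]
    cases hs : (PySem.Dict.ofList submap).items.all (fun p => (PySem.Dict.ofList mmap).contains p.1)
    · rw [if_pos (show (!false) = true from rfl)]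
      obtain ⟨p, hp, hc⟩ := List.all_eq_false.mp hs
      refine (List.all_eq_false.mpr ⟨p, hp, ?_⟩).symm
      simp [hc]
    · rw [if_neg (show ¬((!true) = true) by simp)]
      rw [Bool.eq_iff_iff]
      simp only [List.all_eq_true] at hs ⊢
      constructor
      · intro h p hp
        have := h p hp
        rw [if_pos (hs p hp)] at this
        rw [if_pos (hs p hp)]
        exact this
      · intro h p hp
        have := h p hp
        rw [if_pos (hs p hp)] at this
        rw [if_pos (hs p hp)]
        exact this

-- ===== VERDICT (by name: the statement is the Claim_ definition above) =====
theorem map_contains_submap_py_spec : Claim_equal_map_contains_submap_py := by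
  intro mmap submap hard_match _
  exact map_contains_submap_py_eq mmap submap hard_match
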